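-- pv_equiv track=rewrite | github.com/guidovezzoni/links-library-skill | scripts/add_link.py | parse_library
-- ===== SOURCE A (Python) =====
-- def parse_library(text: str) -> dict:
--     """Parse markdown into {category: [entry_lines]} preserving discovery order."""
--     cats: dict = {}
--     current = None
--     for line in text.splitlines():
--         stripped = line.rstrip()
--         if stripped.startswith("## "):
--             current = stripped[3:].strip()
--             if current not in cats:
--                 cats[current] = []
--         elif current is not None and stripped.startswith("* "):
--             cats[current].append(stripped)
--     return cats
-- ===== SOURCE B (Python) =====
-- def parse_library(text: str) -> dict:
--     """Parse markdown into {category: [entry_lines]} in two phases: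
--     segment into header blocks, then collect '* ' lines per category."""
--     lines = [l.rstrip() for l in text.splitlines()]
--     n = len(lines)
--     # phase 1: partition into (category, block-body) pairs; drop pre-header lines
--     blocks = []
--     i = 0
--     while i < n and not lines[i].startswith("## "):
--         i += 1
--     while i < n:
--         name = lines[i][3:].strip()
--         j = i + 1
--         while j < n and not lines[j].startswith("## "):
--             j += 1
--         blocks.append((name, lines[i + 1:j]))
--         i = j
--     # phase 2: build the dict; repeated category names share one list
--     cats: dict = {}
--     for name, body in blocks:
--         if name not in cats:
--             cats[name] = []
--         cats[name].extend(l for l in body if l.startswith("* "))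
--     return cats
-- ===== Notes on version B (the rewrite author's own statement) =====
-- stated objective: alternative
-- what changed: A's single state-machine pass tracking the currently open category is replaced by a two-phase shape: first partition the rstripped lines into (category, block) segments at header lines, then build the dict from the segments, merging repeated category names into one list.
import Mathlib
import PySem

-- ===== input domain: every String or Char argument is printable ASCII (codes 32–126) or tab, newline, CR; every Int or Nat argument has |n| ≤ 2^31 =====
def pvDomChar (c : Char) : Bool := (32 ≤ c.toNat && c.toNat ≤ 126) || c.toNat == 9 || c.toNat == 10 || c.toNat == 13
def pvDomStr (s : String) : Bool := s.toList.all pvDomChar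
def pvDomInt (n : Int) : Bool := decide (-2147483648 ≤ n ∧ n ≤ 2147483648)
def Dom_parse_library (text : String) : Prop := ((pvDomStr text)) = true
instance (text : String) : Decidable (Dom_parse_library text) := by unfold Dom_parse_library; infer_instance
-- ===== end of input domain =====

-- B replaces A's one-pass state machine by a partition-into-header-blocks phase followed by a
-- dict-building phase; same result, same cost (objective: alternative decomposition).

-- ===== PORT A =====
-- one loop iteration of A, on the already-rstripped line ('stripped')
def pvAStepR (st : PySem.Dict String (List String) × Option String) (stripped : String) :
    PySem.Dict String (List String) × Option String :=
  if PySem.Str.startswith stripped "## " then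
    let current := PySem.Str.strip (PySem.Str.slice stripped (some 3) none)
    let cats := if st.1.contains current then st.1 else st.1.insert current []
    (cats, some current)
  else
    match st.2 with
    | some c =>
        if PySem.Str.startswith stripped "* " then
          -- cats[current].append(stripped); 'current' is always a key here, so modify = in-place append
          (st.1.modify c [] (fun v => v ++ [stripped]), some c)
        else st
    | none => st

def parse_library (text : String) : List (String × List String) :=
  (((PySem.Str.splitlines text).foldl
      (fun st line => pvAStepR st (PySem.Str.rstrip line))
      (PySem.Dict.empty, none)).1).items

-- ===== PORT B =====
def pvIsHeader (s : String) : Bool := PySem.Str.startswith s "## "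

def pvIsStar (s : String) : Bool := PySem.Str.startswith s "* "

-- phase 1: the two while-loops — skip non-header lines, then cut a (name, body) segment at
-- each header, the body running to the next header
def pvBlocks : List String → List (String × List String)
  | [] => []
  | l :: rest =>
    if pvIsHeader l then
      (PySem.Str.strip (PySem.Str.slice l (some 3) none),
        rest.takeWhile (fun x => !pvIsHeader x)) :: pvBlocks (rest.dropWhile (fun x => !pvIsHeader x))
    else
      pvBlocks rest
termination_by ls => ls.length
decreasing_by
  · have := List.length_dropWhile_le (fun x => !pvIsHeader x) rest
    simp only [List.length_cons]; omega
  · simp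

-- phase 2: one build step — ensure the key, then extend with the block's '* ' lines
def pvBuildStep (cats : PySem.Dict String (List String)) (nb : String × List String) :
    PySem.Dict String (List String) :=
  let cats1 := if cats.contains nb.1 then cats else cats.insert nb.1 []
  cats1.modify nb.1 [] (fun v => v ++ nb.2.filter pvIsStar)

def parse_library_alt (text : String) : List (String × List String) :=
  (((pvBlocks ((PySem.Str.splitlines text).map PySem.Str.rstrip)).foldl
      pvBuildStep PySem.Dict.empty)).items

-- ===== PRECONDITION & SPEC =====
def Spec_parse_library (text : String) (out : List (String × List String)) : Prop := out = parse_library_alt text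
instance (text : String) (out : List (String × List String)) : Decidable (Spec_parse_library text out) := by unfold Spec_parse_library; infer_instance

-- ===== CLAIM (what is proved, stated in full; the proofs are below) =====
def Claim_equal_parse_library : Prop := ∀ (text : String), Dom_parse_library text → Spec_parse_library text (parse_library text)

-- ===== LEMMAS AND PROOFS =====

-- re-inserting the value already stored at a present key is a no-op (keys Nodup)
theorem pv_insert_getD_self (d : PySem.Dict String (List String)) (k : String)
    (hnd : d.keys.Nodup) (hc : d.contains k = true) :
    d.insert k (d.getD k []) = d := by
  apply PySem.Dict.ext
  rw [PySem.Dict.items_insert_of_contains d _ hc]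
  conv_rhs => rw [← List.map_id d.items]
  apply List.map_congr_left
  intro p hp
  obtain ⟨p1, p2⟩ := p
  by_cases h : p1 = k
  · subst h
    have := PySem.Dict.getD_of_mem_items d hp hnd ([] : List String)
    simp [this]
  · simp [h]

theorem pv_modify_nil (d : PySem.Dict String (List String)) (k : String)
    (hnd : d.keys.Nodup) (hc : d.contains k = true) :
    d.modify k [] (fun v => v ++ []) = d := by
  simpa [PySem.Dict.modify] using pv_insert_getD_self d k hnd hc

theorem pv_modify_modify (d : PySem.Dict String (List String)) (k : String)
    (f g : List String → List String) :
    (d.modify k [] f).modify k [] g = d.modify k [] (fun v => g (f v)) := by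
  simp [PySem.Dict.modify, PySem.Dict.getD_insert_self, PySem.Dict.insert_insert_self]

-- the state after the 'ensure key' step
theorem pv_contains_ensure (d : PySem.Dict String (List String)) (k : String) :
    (if d.contains k then d else d.insert k []).contains k = true := by
  by_cases h : d.contains k = true
  · simpa [h]
  · simp only [Bool.not_eq_true] at h
    simp [h, PySem.Dict.contains_insert_self]

theorem pv_nodup_ensure (d : PySem.Dict String (List String)) (k : String)
    (hnd : d.keys.Nodup) :
    (if d.contains k then d else d.insert k ([] : List String)).keys.Nodup := by
  split
  · exact hnd
  · exact PySem.Dict.nodup_keys_insert _ _ _ hnd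

theorem pv_nodup_modify (d : PySem.Dict String (List String)) (k : String)
    (f : List String → List String) (hnd : d.keys.Nodup) :
    (d.modify k [] f).keys.Nodup := by
  simpa [PySem.Dict.modify] using PySem.Dict.nodup_keys_insert d k _ hnd

theorem pv_contains_modify_self (d : PySem.Dict String (List String)) (k : String)
    (f : List String → List String) (hc : d.contains k = true) :
    (d.modify k [] f).contains k = true := by
  simp [PySem.Dict.modify, PySem.Dict.contains_insert_self]

-- MAIN INVARIANT: A's loop with current = some c, where c is a present key, equals
-- "flush the '* ' lines of the open block into c, then build the remaining blocks"
theorem pv_loop_some (ls : List String) :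
    ∀ (d : PySem.Dict String (List String)) (c : String),
      d.keys.Nodup → d.contains c = true →
      (ls.foldl pvAStepR (d, some c)).1 =
        (pvBlocks (ls.dropWhile (fun x => !pvIsHeader x))).foldl pvBuildStep
          (d.modify c [] (fun v => v ++ (ls.takeWhile (fun x => !pvIsHeader x)).filter pvIsStar)) := by
  induction ls with
  | nil =>
      intro d c hnd hc
      simp only [List.foldl_nil, List.dropWhile_nil, List.takeWhile_nil, List.filter_nil,
        pvBlocks]
      exact (pv_modify_nil d c hnd hc).symm
  | cons l rest ih =>
      intro d c hnd hc
      by_cases hh : pvIsHeader l = true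
      · -- header line: the open block of c ends (empty '* ' flush), a new block starts
        have hstep : pvAStepR (d, some c) l =
            ((if d.contains (PySem.Str.strip (PySem.Str.slice l (some 3) none)) then d
              else d.insert (PySem.Str.strip (PySem.Str.slice l (some 3) none)) []),
             some (PySem.Str.strip (PySem.Str.slice l (some 3) none))) := by
          simp [pvAStepR, pvIsHeader] at hh ⊢
          simp [hh]
        rw [List.foldl_cons, hstep]
        rw [ih _ _ (pv_nodup_ensure d _ hnd) (pv_contains_ensure d _)]
        have hdw : (l :: rest).dropWhile (fun x => !pvIsHeader x) = l :: rest := by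
          simp [hh]
        have htw : (l :: rest).takeWhile (fun x => !pvIsHeader x) = [] := by
          simp [hh]
        rw [hdw, htw]
        rw [pvBlocks]
        simp only [hh, if_pos]
        rw [List.foldl_cons]
        have : pvBuildStep (d.modify c [] (fun v => v ++ List.filter pvIsStar []))
            (PySem.Str.strip (PySem.Str.slice l (some 3) none),
              rest.takeWhile (fun x => !pvIsHeader x)) =
            (if d.contains (PySem.Str.strip (PySem.Str.slice l (some 3) none)) then d
              else d.insert (PySem.Str.strip (PySem.Str.slice l (some 3) none)) []).modify
              (PySem.Str.strip (PySem.Str.slice l (some 3) none)) []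
              (fun v => v ++ (rest.takeWhile (fun x => !pvIsHeader x)).filter pvIsStar) := by
          rw [show List.filter pvIsStar [] = [] from rfl, pv_modify_nil d c hnd hc]
          rfl
        rw [this]
      · -- non-header line
        have hstep : pvAStepR (d, some c) l =
            (if pvIsStar l then (d.modify c [] (fun v => v ++ [l]), some c) else (d, some c)) := by
          simp [pvAStepR, pvIsHeader, pvIsStar] at hh ⊢
          simp [hh]
        have hdw : (l :: rest).dropWhile (fun x => !pvIsHeader x) =
            rest.dropWhile (fun x => !pvIsHeader x) := by
          simp [hh]
        have htw : (l :: rest).takeWhile (fun x => !pvIsHeader x) =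
            l :: rest.takeWhile (fun x => !pvIsHeader x) := by
          simp [hh]
        rw [List.foldl_cons, hstep, hdw, htw]
        by_cases hs : pvIsStar l = true
        · rw [if_pos hs]
          rw [ih _ _ (pv_nodup_modify d c _ hnd) (pv_contains_modify_self d c _ hc)]
          rw [pv_modify_modify]
          simp [hs]
        · rw [if_neg hs]
          rw [ih _ _ hnd hc]
          simp only [List.filter_cons, hs]
          simp

-- A's loop with current = None equals building the blocks (pre-header lines are ignored)
theorem pv_loop_none (ls : List String) :
    ∀ (d : PySem.Dict String (List String)), d.keys.Nodup →
      (ls.foldl pvAStepR (d, none)).1 = (pvBlocks ls).foldl pvBuildStep d := by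
  induction ls with
  | nil => intro d _; simp [pvBlocks]
  | cons l rest ih =>
      intro d hnd
      by_cases hh : pvIsHeader l = true
      · have hstep : pvAStepR (d, none) l =
            ((if d.contains (PySem.Str.strip (PySem.Str.slice l (some 3) none)) then d
              else d.insert (PySem.Str.strip (PySem.Str.slice l (some 3) none)) []),
             some (PySem.Str.strip (PySem.Str.slice l (some 3) none))) := by
          simp [pvAStepR, pvIsHeader] at hh ⊢
          simp [hh]
        rw [List.foldl_cons, hstep,
          pv_loop_some rest _ _ (pv_nodup_ensure d _ hnd) (pv_contains_ensure d _)]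
        rw [pvBlocks]
        simp only [hh, if_pos, List.foldl_cons]
        rfl
      · have hstep : pvAStepR (d, none) l = (d, none) := by
          simp [pvAStepR, pvIsHeader] at hh ⊢
          simp [hh]
        rw [List.foldl_cons, hstep, ih d hnd, pvBlocks]
        simp [hh]

-- ===== VERDICT (by name: the statement is the Claim_ definition above) =====
theorem parse_library_spec : Claim_equal_parse_library := by
  intro text _
  unfold Spec_parse_library parse_library parse_library_alt
  rw [← List.foldl_map]
  rw [pv_loop_none _ _ (PySem.Dict.nodup_keys_empty)]
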